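-- pv_equiv track=rewrite | github.com/rodmena-limited/scriptplan | scriptplan/parser/macro_processor.py | strip_shell_comments
-- ===== SOURCE A (Python) =====
-- def strip_shell_comments(text: str) -> str:
--     """Strip shell-style comments from text, preserving strings.
--
--     Shell comments start with # and continue to end of line.
--     Comments inside strings (single or double quoted) are preserved.
--     """
--     result = []
--     i = 0
--     n = len(text)
--
--     while i < n:
--         # Check for strings - preserve them entirely
--         if text[i] in "\"'":
--             quote = text[i]
--             result.append(text[i])
--             i += 1
--             while i < n and text[i] != quote:
--                 result.append(text[i])
--                 i += 1
--             if i < n: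
--                 result.append(text[i])  # closing quote
--                 i += 1
--         # Check for shell comment
--         elif text[i] == "#":
--             # Skip until end of line
--             while i < n and text[i] != "\n":
--                 i += 1
--             # Keep the newline
--             if i < n:
--                 result.append(text[i])
--                 i += 1
--         else:
--             result.append(text[i])
--             i += 1
--
--     return "".join(result)
-- ===== SOURCE B (Python) =====
-- def strip_shell_comments(text: str) -> str:
--     """Strip shell-style comments, preserving quoted strings (single flat pass with a mode variable)."""
--     out = []
--     mode = None  # None = normal, '#' = inside comment, '"'/"'" = inside that string
--     for ch in text:
--         if mode is None:
--             if ch == '"' or ch == "'":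
--                 mode = ch
--                 out.append(ch)
--             elif ch == "#":
--                 mode = "#"
--             else:
--                 out.append(ch)
--         elif mode == "#":
--             if ch == "\n":
--                 mode = None
--                 out.append(ch)
--         else:
--             out.append(ch)
--             if ch == mode:
--                 mode = None
--     return "".join(out)
-- ===== Notes on version B (the rewrite author's own statement) =====
-- stated objective: simpler
-- what changed: Replaced A's index-based outer while-loop with nested inner while-loops (one per quote/comment region) by a single flat for-loop over characters driven by a mode variable; the flat loop also runs measurably faster (no per-char index arithmetic, comment chars skipped without appends).
import Mathlib
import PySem

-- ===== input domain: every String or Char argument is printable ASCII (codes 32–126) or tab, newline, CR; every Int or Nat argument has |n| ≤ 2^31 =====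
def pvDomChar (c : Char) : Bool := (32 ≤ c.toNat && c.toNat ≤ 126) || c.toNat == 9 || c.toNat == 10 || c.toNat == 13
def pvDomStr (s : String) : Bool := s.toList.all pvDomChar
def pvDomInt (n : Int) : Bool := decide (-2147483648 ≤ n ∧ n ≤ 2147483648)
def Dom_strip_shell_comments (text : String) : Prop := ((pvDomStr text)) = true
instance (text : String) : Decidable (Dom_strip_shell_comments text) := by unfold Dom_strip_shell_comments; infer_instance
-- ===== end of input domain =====

-- B replaces A's nested while-loops (an inner loop per quoted/comment region) by one flat
-- pass with a mode accumulator — same O(n) cost, simpler control flow.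

-- ===== PORT A =====
-- A: outer loop over positions; separate inner loops consume a quoted region / a comment.
mutual
def pvStripA : List Char → List Char
  | [] => []
  | c :: rest =>
    if c = '"' ∨ c = '\'' then c :: pvGoStr c rest
    else if c = '#' then pvGoComment rest
    else c :: pvStripA rest
def pvGoStr (q : Char) : List Char → List Char
  | [] => []
  | c :: rest => if c = q then c :: pvStripA rest else c :: pvGoStr q rest
def pvGoComment : List Char → List Char
  | [] => []
  | c :: rest => if c = '\n' then c :: pvStripA rest else pvGoComment rest
end

def strip_shell_comments (text : String) : String := String.ofList (pvStripA text.toList)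

-- ===== PORT B =====
-- B: one flat pass with a mode accumulator (none = normal, some '#' = comment, some q = in-string).
def pvStepB (acc : List Char × Option Char) (ch : Char) : List Char × Option Char :=
  let (out, mode) := acc
  if mode = none then
    if ch = '"' ∨ ch = '\'' then (out ++ [ch], some ch)
    else if ch = '#' then (out, some '#')
    else (out ++ [ch], mode)
  else if mode = some '#' then
    if ch = '\n' then (out ++ [ch], none) else (out, mode)
  else
    (out ++ [ch], if some ch = mode then none else mode)

def strip_shell_comments_alt (text : String) : String :=
  String.ofList (text.toList.foldl pvStepB ([], none)).1

-- ===== PRECONDITION & SPEC =====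
def Spec_strip_shell_comments (text : String) (out : String) : Prop := out = strip_shell_comments_alt text
instance (text : String) (out : String) : Decidable (Spec_strip_shell_comments text out) := by unfold Spec_strip_shell_comments; infer_instance

-- ===== CLAIM (what is proved, stated in full; the proofs are below) =====
def Claim_equal_strip_shell_comments : Prop := ∀ (text : String), Dom_strip_shell_comments text → Spec_strip_shell_comments text (strip_shell_comments text)

-- ===== LEMMAS AND PROOFS =====

-- Running B's fold from each of the three mode states produces A's corresponding loop's output.
theorem pvRun (l : List Char) : ∀ (out : List Char),
    ((l.foldl pvStepB (out, none)).1 = out ++ pvStripA l)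
    ∧ ((l.foldl pvStepB (out, some '#')).1 = out ++ pvGoComment l)
    ∧ (∀ q : Char, q ≠ '#' →
        (l.foldl pvStepB (out, some q)).1 = out ++ pvGoStr q l) := by
  induction l with
  | nil => intro out; simp [pvStripA, pvGoComment, pvGoStr]
  | cons c rest ih =>
    intro out
    refine ⟨?_, ?_, ?_⟩
    · by_cases hq : c = '"' ∨ c = '\''
      · have hc : c ≠ '#' := by rcases hq with h | h <;> simp [h]
        simp only [List.foldl_cons, pvStepB, if_pos hq]
        simp only [reduceIte]
        rw [(ih (out ++ [c])).2.2 c hc]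
        rw [pvStripA, if_pos hq]
        simp
      · by_cases h3 : c = '#'
        · subst h3
          simp only [List.foldl_cons, pvStepB]
          simp
          rw [(ih out).2.1, pvStripA]
          simp
        · simp only [List.foldl_cons, pvStepB]
          simp [hq, h3]
          rw [(ih (out ++ [c])).1, pvStripA]
          simp [hq, h3]
    · by_cases hn : c = '\n'
      · subst hn
        simp only [List.foldl_cons, pvStepB]
        simp
        rw [(ih (out ++ ['\n'])).1, pvGoComment]
        simp
      · simp only [List.foldl_cons, pvStepB]
        simp [hn]
        rw [(ih out).2.1, pvGoComment, if_neg hn]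
    · intro q hq
      by_cases he : c = q
      · subst he
        simp only [List.foldl_cons, pvStepB]
        simp [hq]
        rw [(ih (out ++ [c])).1, pvGoStr]
        simp
      · simp only [List.foldl_cons, pvStepB]
        simp [hq, he]
        rw [(ih (out ++ [c])).2.2 q hq, pvGoStr, if_neg he]
        simp

-- ===== VERDICT (by name: the statement is the Claim_ definition above) =====
theorem strip_shell_comments_spec : Claim_equal_strip_shell_comments := by
  intro text _
  unfold Spec_strip_shell_comments strip_shell_comments strip_shell_comments_alt
  rw [(pvRun text.toList []).1]
  simp
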